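-- pv_equiv track=rewrite | github.com/TortoiseWolfe/TurtleWolfe | scripts/project-status.py | format_terminal_grid
-- ===== SOURCE A (Python) =====
-- COUNCIL = ["cto", "architect", "security-lead", "toolsmith", "devops", "product-owner"]
--
-- GENERATORS = ["generator-1", "generator-2", "generator-3"]
--
-- PIPELINE = ["planner", "preview-host", "wireframe-qa", "validator", "inspector"]
--
-- IMPLEMENTATION = ["developer", "test-engineer", "auditor"]
--
-- def format_terminal_grid(data):
--     """Format terminal status as ASCII grid"""
--     lines = []
--
--     def format_group(name, terminals):
--         group_lines = [f"  {name}"]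
--         row = "  "
--         for i, t in enumerate(terminals):
--             info = data.get("terminals", {}).get(t, {})
--             status = info.get("status", "idle")[:8]
--             row += f"{t}: {status}".ljust(20)
--             if (i + 1) % 3 == 0:
--                 group_lines.append(row)
--                 row = "  "
--         if row.strip():
--             group_lines.append(row)
--         return group_lines
--
--     lines.extend(format_group("COUNCIL", COUNCIL))
--     lines.append("")
--     lines.extend(format_group("GENERATORS", GENERATORS))
--     lines.append("")
--     lines.extend(format_group("PIPELINE", PIPELINE))
--     lines.append("")
--     lines.extend(format_group("IMPLEMENTATION", IMPLEMENTATION))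
--
--     return lines
-- ===== SOURCE B (Python) =====
-- COUNCIL = ["cto", "architect", "security-lead", "toolsmith", "devops", "product-owner"]
--
-- GENERATORS = ["generator-1", "generator-2", "generator-3"]
--
-- PIPELINE = ["planner", "preview-host", "wireframe-qa", "validator", "inspector"]
--
-- IMPLEMENTATION = ["developer", "test-engineer", "auditor"]
--
-- def format_terminal_grid(data):
--     """Format terminal status as ASCII grid: one row per batch of three terminals."""
--     terminals_info = data.get("terminals", {})
--
--     def cell(t):
--         status = terminals_info.get(t, {}).get("status", "idle")[:8]
--         return f"{t}: {status}".ljust(20)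
--
--     def group(name, terminals):
--         return [f"  {name}"] + [
--             "  " + "".join(cell(t) for t in terminals[i:i + 3])
--             for i in range(0, len(terminals), 3)
--         ]
--
--     return (group("COUNCIL", COUNCIL) + [""]
--             + group("GENERATORS", GENERATORS) + [""]
--             + group("PIPELINE", PIPELINE) + [""]
--             + group("IMPLEMENTATION", IMPLEMENTATION))
-- ===== Notes on version B (the rewrite author's own statement) =====
-- stated objective: simpler
-- what changed: A accumulates a row string per element and flushes it on (i+1)%3==0 plus a final strip() check; B slices each group into batches of three and emits one joined row per batch, so no accumulator or flush test exists.
import Mathlib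
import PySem

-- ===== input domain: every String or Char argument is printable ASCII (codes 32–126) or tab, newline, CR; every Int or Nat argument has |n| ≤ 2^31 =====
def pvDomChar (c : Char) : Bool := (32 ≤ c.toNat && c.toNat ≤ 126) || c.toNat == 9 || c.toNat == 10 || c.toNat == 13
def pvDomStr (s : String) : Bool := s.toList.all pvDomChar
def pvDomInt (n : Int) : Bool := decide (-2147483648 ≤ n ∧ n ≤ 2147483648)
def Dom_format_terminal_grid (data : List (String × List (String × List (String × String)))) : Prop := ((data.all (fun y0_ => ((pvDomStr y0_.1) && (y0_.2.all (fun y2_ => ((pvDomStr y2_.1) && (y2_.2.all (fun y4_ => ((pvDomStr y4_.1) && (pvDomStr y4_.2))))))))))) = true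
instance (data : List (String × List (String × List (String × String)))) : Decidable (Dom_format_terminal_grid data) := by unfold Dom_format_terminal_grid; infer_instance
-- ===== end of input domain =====

-- B replaces A's per-element accumulator with a (i+1)%3==0 flush by batch-of-3 slicing: one row per chunk, built by join (objective: simpler).

-- ===== PORT A =====
-- constants
def pvCOUNCIL : List String := ["cto", "architect", "security-lead", "toolsmith", "devops", "product-owner"]
def pvGENERATORS : List String := ["generator-1", "generator-2", "generator-3"]
def pvPIPELINE : List String := ["planner", "preview-host", "wireframe-qa", "validator", "inspector"]
def pvIMPLEMENTATION : List String := ["developer", "test-engineer", "auditor"]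

-- hand ports (exact on all inputs): Python str concatenation, and str.ljust(w) = s padded with spaces to width w (unchanged when len(s) ≥ w)
def pvStrCat (a b : String) : String := String.ofList (a.toList ++ b.toList)
def pvLjust (s : String) (w : Nat) : String := String.ofList (s.toList ++ List.replicate (w - s.toList.length) ' ')


def pvCellA (data : List (String × List (String × List (String × String)))) (t : String) : String :=
  let info := PySem.Dict.getD (PySem.Dict.mk (PySem.Dict.getD (PySem.Dict.mk data) "terminals" [])) t []
  let status := PySem.Str.slice (PySem.Dict.getD (PySem.Dict.mk info) "status" "idle") none (some 8)
  pvLjust (pvStrCat t (pvStrCat ": " status)) 20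

def pvGroupA (data : List (String × List (String × List (String × String)))) (name : String) (terminals : List String) : List String :=
  let st := (PySem.List.enumerate terminals).foldl
    (fun (st : List String × String) it =>
      let row := pvStrCat st.2 (pvCellA data it.2)
      if PySem.Int.mod (it.1 + 1) 3 == 0 then (st.1 ++ [row], "  ") else (st.1, row))
    ([pvStrCat "  " name], "  ")
  if (PySem.Str.strip st.2).toList ≠ [] then st.1 ++ [st.2] else st.1

def format_terminal_grid (data : List (String × List (String × List (String × String)))) : List String :=
  pvGroupA data "COUNCIL" pvCOUNCIL ++ [""] ++ pvGroupA data "GENERATORS" pvGENERATORS ++ [""]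
    ++ pvGroupA data "PIPELINE" pvPIPELINE ++ [""] ++ pvGroupA data "IMPLEMENTATION" pvIMPLEMENTATION


-- ===== PORT B =====
def pvTermsB (data : List (String × List (String × List (String × String)))) : PySem.Dict String (List (String × String)) :=
  PySem.Dict.mk (PySem.Dict.getD (PySem.Dict.mk data) "terminals" [])

def pvCellB (data : List (String × List (String × List (String × String)))) (t : String) : String :=
  let status := PySem.Str.slice (PySem.Dict.getD (PySem.Dict.mk ((pvTermsB data).getD t [])) "status" "idle") none (some 8)
  pvLjust (pvStrCat t (pvStrCat ": " status)) 20

def pvGroupB (data : List (String × List (String × List (String × String)))) (name : String) (terminals : List String) : List String :=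
  pvStrCat "  " name ::
    (PySem.List.pyRange 0 terminals.length 3).map (fun i =>
      pvStrCat "  " (PySem.Str.join "" ((PySem.List.slice terminals (some i) (some (i + 3))).map (pvCellB data))))

def format_terminal_grid_alt (data : List (String × List (String × List (String × String)))) : List String :=
  pvGroupB data "COUNCIL" pvCOUNCIL ++ [""] ++ pvGroupB data "GENERATORS" pvGENERATORS ++ [""]
    ++ pvGroupB data "PIPELINE" pvPIPELINE ++ [""] ++ pvGroupB data "IMPLEMENTATION" pvIMPLEMENTATION


-- ===== PRECONDITION & SPEC =====
def Spec_format_terminal_grid (data : List (String × List (String × List (String × String)))) (out : List String) : Prop := out = format_terminal_grid_alt data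
instance (data : List (String × List (String × List (String × String)))) (out : List String) : Decidable (Spec_format_terminal_grid data out) := by unfold Spec_format_terminal_grid; infer_instance

-- ===== CLAIM (what is proved, stated in full; the proofs are below) =====
def Claim_equal_format_terminal_grid : Prop := ∀ (data : List (String × List (String × List (String × String)))), Dom_format_terminal_grid data → Spec_format_terminal_grid data (format_terminal_grid data)

-- ===== LEMMAS AND PROOFS =====
lemma pvRange6 : PySem.List.pyRange 0 6 3 = [0, 3] := by decide
lemma pvRange5 : PySem.List.pyRange 0 5 3 = [0, 3] := by decide
lemma pvRange3 : PySem.List.pyRange 0 3 3 = [0] := by decide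

lemma pvLen0 : "cto".length = 3 := rfl
lemma pvLen1 : "architect".length = 9 := rfl
lemma pvLen2 : "security-lead".length = 13 := rfl
lemma pvLen3 : "toolsmith".length = 9 := rfl
lemma pvLen4 : "devops".length = 6 := rfl
lemma pvLen5 : "product-owner".length = 13 := rfl
lemma pvLen6 : "generator-1".length = 11 := rfl
lemma pvLen7 : "generator-2".length = 11 := rfl
lemma pvLen8 : "generator-3".length = 11 := rfl
lemma pvLen9 : "planner".length = 7 := rfl
lemma pvLen10 : "preview-host".length = 12 := rfl
lemma pvLen11 : "wireframe-qa".length = 12 := rfl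
lemma pvLen12 : "validator".length = 9 := rfl
lemma pvLen13 : "inspector".length = 9 := rfl
lemma pvLen14 : "developer".length = 9 := rfl
lemma pvLen15 : "test-engineer".length = 13 := rfl
lemma pvLen16 : "auditor".length = 7 := rfl

lemma pvStripBlank : PySem.Chars.strip [' ', ' '] = [] := by decide

theorem mem_dropWhile_of_not {α} (p : α → Bool) {l : List α} {c : α} (hc : c ∈ l) (h : p c = false) : c ∈ List.dropWhile p l := by
  have hsplit : c ∈ List.takeWhile p l ++ List.dropWhile p l := by
    rw [List.takeWhile_append_dropWhile]; exact hc
  rcases List.mem_append.mp hsplit with h1 | h2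
  · exact absurd (List.mem_takeWhile_imp h1) (by simp [h])
  · exact h2

theorem strip_ne_nil {l : List Char} {c : Char} (hc : c ∈ l) (h : PySem.Chars.isspace c = false) : PySem.Chars.strip l ≠ [] := by
  simp only [PySem.Chars.strip, PySem.Chars.lstrip, PySem.Chars.rstrip]
  simp only [ne_eq, List.reverse_eq_nil_iff, List.dropWhile_eq_nil_iff, List.mem_reverse, not_forall]
  exact ⟨c, mem_dropWhile_of_not _ hc h, by simp [h]⟩

lemma pvPad (n m : Nat) : 20 - (n + (m + 1 + 1)) = 18 - n - m := by omega


lemma pvGroup_eq_council (data : List (String × List (String × List (String × String)))) :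
    pvGroupA data "COUNCIL" pvCOUNCIL = pvGroupB data "COUNCIL" pvCOUNCIL := by
  simp [pvGroupA, pvGroupB, pvGENERATORS, pvCOUNCIL, pvPIPELINE, pvIMPLEMENTATION, pvStrCat,
    PySem.List.enumerate, PySem.Str.join, PySem.Chars.join,
    pvRange6, pvRange5, pvRange3, pvLen0, pvLen1, pvLen2, pvLen3, pvLen4, pvLen5, pvLen6, pvLen7,
    pvLen8, pvLen9, pvLen10, pvLen11, pvLen12, pvLen13, pvLen14, pvLen15, pvLen16,
    PySem.List.slice, PySem.List.clampIdx, PySem.Int.mod, pvStripBlank,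
    List.foldl, List.intercalate, List.intersperse, pvCellA, pvCellB, pvTermsB, pvLjust,
    ← String.toList_inj, String.toList_append, String.toList_ofList, pvPad]


lemma pvGroup_eq_generators (data : List (String × List (String × List (String × String)))) :
    pvGroupA data "GENERATORS" pvGENERATORS = pvGroupB data "GENERATORS" pvGENERATORS := by
  simp [pvGroupA, pvGroupB, pvGENERATORS, pvCOUNCIL, pvPIPELINE, pvIMPLEMENTATION, pvStrCat,
    PySem.List.enumerate, PySem.Str.join, PySem.Chars.join,
    pvRange6, pvRange5, pvRange3, pvLen0, pvLen1, pvLen2, pvLen3, pvLen4, pvLen5, pvLen6, pvLen7,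
    pvLen8, pvLen9, pvLen10, pvLen11, pvLen12, pvLen13, pvLen14, pvLen15, pvLen16,
    PySem.List.slice, PySem.List.clampIdx, PySem.Int.mod, pvStripBlank,
    List.foldl, List.intercalate, List.intersperse, pvCellA, pvCellB, pvTermsB, pvLjust,
    ← String.toList_inj, String.toList_append, String.toList_ofList, pvPad]


lemma pvGroup_eq_implementation (data : List (String × List (String × List (String × String)))) :
    pvGroupA data "IMPLEMENTATION" pvIMPLEMENTATION = pvGroupB data "IMPLEMENTATION" pvIMPLEMENTATION := by
  simp [pvGroupA, pvGroupB, pvGENERATORS, pvCOUNCIL, pvPIPELINE, pvIMPLEMENTATION, pvStrCat,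
    PySem.List.enumerate, PySem.Str.join, PySem.Chars.join,
    pvRange6, pvRange5, pvRange3, pvLen0, pvLen1, pvLen2, pvLen3, pvLen4, pvLen5, pvLen6, pvLen7,
    pvLen8, pvLen9, pvLen10, pvLen11, pvLen12, pvLen13, pvLen14, pvLen15, pvLen16,
    PySem.List.slice, PySem.List.clampIdx, PySem.Int.mod, pvStripBlank,
    List.foldl, List.intercalate, List.intersperse, pvCellA, pvCellB, pvTermsB, pvLjust,
    ← String.toList_inj, String.toList_append, String.toList_ofList, pvPad]


lemma pvGroup_eq_pipeline (data : List (String × List (String × List (String × String)))) :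
    pvGroupA data "PIPELINE" pvPIPELINE = pvGroupB data "PIPELINE" pvPIPELINE := by
  simp [pvGroupA, pvGroupB, pvGENERATORS, pvCOUNCIL, pvPIPELINE, pvIMPLEMENTATION, pvStrCat,
    PySem.List.enumerate, PySem.Str.join, PySem.Chars.join,
    pvRange6, pvRange5, pvRange3, pvLen0, pvLen1, pvLen2, pvLen3, pvLen4, pvLen5, pvLen6, pvLen7,
    pvLen8, pvLen9, pvLen10, pvLen11, pvLen12, pvLen13, pvLen14, pvLen15, pvLen16,
    PySem.List.slice, PySem.List.clampIdx, PySem.Int.mod, pvStripBlank,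
    List.foldl, List.intercalate, List.intersperse, pvCellA, pvCellB, pvTermsB, pvLjust,
    ← String.toList_inj, String.toList_append, String.toList_ofList, pvPad]
  split_ifs with h
  · exact absurd h (strip_ne_nil (c := ':') (by simp) (by decide))
  · simp [← String.toList_inj, String.toList_append, String.toList_ofList]


-- ===== VERDICT (by name: the statement is the Claim_ definition above) =====
theorem format_terminal_grid_spec : Claim_equal_format_terminal_grid := by
  intro data _
  unfold Spec_format_terminal_grid format_terminal_grid format_terminal_grid_alt
  rw [pvGroup_eq_council, pvGroup_eq_generators, pvGroup_eq_pipeline, pvGroup_eq_implementation]
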